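-- pv_equiv track=rewrite | github.com/usanchez/advent_of_code | 2020/5_binary_boarding/5_binary_boarding.py | compute_binary_value
-- ===== SOURCE A (Python) =====
-- def compute_binary_value(seat_subcode, upper_half_letter):
--     """
--     Method that takes a set subcode and converts it to a decimal value (the code is interpreted as a binary value)
--     :param seat_subcode: the code to convert to decimal value
--     :param upper_half_letter: the letter that states which is a '1' in the binary interpretation
--     :return: the decimal value for the code
--     """
--     decimal_num = 0
--     power_value = len(seat_subcode) - 1
--     for code_char in seat_subcode:
--         if code_char == upper_half_letter:
--             decimal_num += pow(2, power_value)
--         power_value -= 1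
--     return decimal_num
-- ===== SOURCE B (Python) =====
-- def compute_binary_value(seat_subcode, upper_half_letter):
--     value = 0
--     for code_char in seat_subcode:
--         value = 2 * value + (1 if code_char == upper_half_letter else 0)
--     return value
-- ===== Notes on version B (the rewrite author's own statement) =====
-- stated objective: simpler
-- what changed: Replaces the decreasing-exponent pow(2,k) accumulation with a single Horner multiply-accumulate pass (value = 2*value + bit), needing no power computation or exponent counter.
import Mathlib
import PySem

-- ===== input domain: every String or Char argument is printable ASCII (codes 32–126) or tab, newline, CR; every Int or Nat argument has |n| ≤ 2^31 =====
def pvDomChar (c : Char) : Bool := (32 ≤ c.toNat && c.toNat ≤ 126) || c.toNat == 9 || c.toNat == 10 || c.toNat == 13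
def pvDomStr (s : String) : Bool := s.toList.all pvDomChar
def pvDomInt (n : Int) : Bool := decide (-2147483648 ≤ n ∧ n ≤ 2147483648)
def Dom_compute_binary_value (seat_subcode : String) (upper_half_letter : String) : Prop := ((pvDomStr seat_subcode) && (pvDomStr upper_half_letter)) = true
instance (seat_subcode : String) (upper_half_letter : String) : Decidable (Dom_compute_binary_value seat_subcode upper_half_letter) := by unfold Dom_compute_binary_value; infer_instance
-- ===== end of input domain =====

-- B replaces A's decreasing-exponent pow(2,k) accumulation by a Horner multiply-accumulate pass (simpler, no exponent counter).

-- ===== PORT A =====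
-- loop state: (decimal_num, power_value); pow(2, power_value) is only evaluated at
-- nonnegative power_value in the loop, so `.toNat` on the exponent is exact here.
def compute_binary_value (seat_subcode : String) (upper_half_letter : String) : Int :=
  (seat_subcode.toList.foldl
    (fun (st : Int × Int) code_char =>
      (if String.ofList [code_char] = upper_half_letter then st.1 + 2 ^ st.2.toNat else st.1,
       st.2 - 1))
    (0, (seat_subcode.toList.length : Int) - 1)).1

-- ===== PORT B =====
def compute_binary_value_alt (seat_subcode : String) (upper_half_letter : String) : Int :=
  seat_subcode.toList.foldl
    (fun (value : Int) code_char =>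
      2 * value + (if String.ofList [code_char] = upper_half_letter then 1 else 0))
    0

-- ===== PRECONDITION & SPEC =====
def Spec_compute_binary_value (seat_subcode : String) (upper_half_letter : String) (out : Int) : Prop := out = compute_binary_value_alt seat_subcode upper_half_letter
instance (seat_subcode : String) (upper_half_letter : String) (out : Int) : Decidable (Spec_compute_binary_value seat_subcode upper_half_letter out) := by unfold Spec_compute_binary_value; infer_instance

-- ===== CLAIM (what is proved, stated in full; the proofs are below) =====
def Claim_equal_compute_binary_value : Prop := ∀ (seat_subcode : String) (upper_half_letter : String), Dom_compute_binary_value seat_subcode upper_half_letter → Spec_compute_binary_value seat_subcode upper_half_letter (compute_binary_value seat_subcode upper_half_letter)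

-- ===== LEMMAS AND PROOFS =====

-- Horner fold started from a instead of 0
theorem horner_shift (u : String) (l : List Char) (a : Int) :
    l.foldl (fun (v : Int) c => 2 * v + (if String.ofList [c] = u then 1 else 0)) a
      = a * 2 ^ l.length + l.foldl (fun (v : Int) c => 2 * v + (if String.ofList [c] = u then 1 else 0)) 0 := by
  induction l generalizing a with
  | nil => simp
  | cons c l ih =>
    simp only [List.foldl_cons, List.length_cons]
    rw [ih, ih (2 * 0 + _)]
    ring

-- A's pow-accumulation fold equals d plus the Horner value
theorem powfold_eq_horner (u : String) (l : List Char) (d : Int) :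
    (l.foldl
      (fun (st : Int × Int) c =>
        (if String.ofList [c] = u then st.1 + 2 ^ st.2.toNat else st.1, st.2 - 1))
      (d, (l.length : Int) - 1)).1
      = d + l.foldl (fun (v : Int) c => 2 * v + (if String.ofList [c] = u then 1 else 0)) 0 := by
  induction l generalizing d with
  | nil => simp
  | cons c l ih =>
    simp only [List.foldl_cons, List.length_cons]
    have h2 : ((l.length : Int) + 1 - 1 - 1) = (l.length : Int) - 1 := by ring
    have h3 : ((l.length : Int) + 1 - 1).toNat = l.length := by omega
    push_cast
    rw [h2, h3, ih]
    rw [horner_shift u l (0 + _)]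
    split_ifs with h <;> simp <;> try ring

-- ===== VERDICT (by name: the statement is the Claim_ definition above) =====
theorem compute_binary_value_spec : Claim_equal_compute_binary_value := by
  intro s u _
  unfold Spec_compute_binary_value compute_binary_value compute_binary_value_alt
  rw [powfold_eq_horner]
  simp
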